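-- pv_equiv track=rewrite | github.com/AldonahZero/QTRAN_PLUS | src/Tools/analyze_molt.py | determine_molt_redis
-- ===== SOURCE A (Python) =====
-- REDIS_AGG_KEYS = {
--     # 排序 / 统计 / 基数 / 位操作等
--     'sort', 'zrange', 'zrevrange', 'zcount', 'zcard', 'scard', 'pfcount', 'bitcount', 'strlen',
--     'zrank', 'zrevrank', 'zrangebylex', 'zlexcount', 'hrandfield'
-- }
--
-- REDIS_NULL_EDGE_TOKENS = {
--     '-inf', '+inf', 'incrbyfloat', 'getbit', 'setbit', 'bitpos', 'bitop', 'pfadd', 'pfmerge'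
-- }
--
-- REDIS_MULTISET_TOKENS = {
--     'zinterstore', 'zunionstore', 'sinterstore', 'sunionstore', 'sdiffstore', 'zmpop', 'smove'
-- }
--
-- def tokenize_redis(cmd: str):
--     return [t.strip().lower() for t in cmd.replace('\n', ' ').split() if t.strip()]
--
-- def determine_molt_redis(command: str) -> str:
--     tokens = tokenize_redis(command)
--     if not tokens:
--         return 'dqe'
--     token_set = set(tokens)
--
--     # 1 聚合/统计/排序
--     if any(t in REDIS_AGG_KEYS for t in token_set):
--         return 'orec'
--     # 2 边界 / NULL / 特殊值（-inf +inf）或近似结构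
--     if any(t in REDIS_NULL_EDGE_TOKENS for t in token_set):
--         return 'tlp'
--     # 3 多集合交叉/合并
--     if any(t in REDIS_MULTISET_TOKENS for t in token_set):
--         return 'pinolo'
--     return 'dqe'
-- ===== SOURCE B (Python) =====
-- REDIS_AGG_KEYS = {
--     'sort', 'zrange', 'zrevrange', 'zcount', 'zcard', 'scard', 'pfcount', 'bitcount', 'strlen',
--     'zrank', 'zrevrank', 'zrangebylex', 'zlexcount', 'hrandfield'
-- }
--
-- REDIS_NULL_EDGE_TOKENS = {
--     '-inf', '+inf', 'incrbyfloat', 'getbit', 'setbit', 'bitpos', 'bitop', 'pfadd', 'pfmerge'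
-- }
--
-- REDIS_MULTISET_TOKENS = {
--     'zinterstore', 'zunionstore', 'sinterstore', 'sunionstore', 'sdiffstore', 'zmpop', 'smove'
-- }
--
-- # one combined index: keyword -> (priority, label); built once at import time
-- _PRIORITY = {}
-- for _t in REDIS_AGG_KEYS:
--     _PRIORITY[_t] = (0, 'orec')
-- for _t in REDIS_NULL_EDGE_TOKENS:
--     _PRIORITY[_t] = (1, 'tlp')
-- for _t in REDIS_MULTISET_TOKENS:
--     _PRIORITY[_t] = (2, 'pinolo')
--
--
-- def tokenize_redis(cmd: str):
--     return [t.strip().lower() for t in cmd.replace('\n', ' ').split() if t.strip()]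
--
--
-- def determine_molt_redis(command: str) -> str:
--     best = None
--     for t in set(tokenize_redis(command)):
--         hit = _PRIORITY.get(t)
--         if hit is not None and (best is None or hit[0] < best[0]):
--             best = hit
--     return best[1] if best is not None else 'dqe'
-- ===== Notes on version B (the rewrite author's own statement) =====
-- stated objective: alternative
-- what changed: Replaces the three sequential any-membership scans (early-return chain) with one keyword->(priority,label) dict built once and a single min-priority-tracking pass over the token set, with no early empty-token return.
import Mathlib
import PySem

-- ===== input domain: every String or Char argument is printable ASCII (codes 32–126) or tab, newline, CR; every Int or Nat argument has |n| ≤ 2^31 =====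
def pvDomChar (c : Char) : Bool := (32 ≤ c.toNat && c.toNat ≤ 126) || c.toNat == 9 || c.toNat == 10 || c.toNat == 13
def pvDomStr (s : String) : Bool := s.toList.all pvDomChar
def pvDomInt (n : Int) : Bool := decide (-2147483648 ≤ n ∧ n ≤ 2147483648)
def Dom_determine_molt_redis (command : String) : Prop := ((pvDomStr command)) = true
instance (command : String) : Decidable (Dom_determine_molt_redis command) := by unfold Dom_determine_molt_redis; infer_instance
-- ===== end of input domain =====

-- B replaces A's three sequential any-membership scans with one keyword->(priority,label) table and a single min-priority pass; alternative structure, same cost.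


-- ===== PORT A =====
-- the three keyword sets of the module, as Python set literals built from their element lists
def pvAggList : List String :=
  ["sort", "zrange", "zrevrange", "zcount", "zcard", "scard", "pfcount", "bitcount", "strlen",
   "zrank", "zrevrank", "zrangebylex", "zlexcount", "hrandfield"]
def pvNullList : List String :=
  ["-inf", "+inf", "incrbyfloat", "getbit", "setbit", "bitpos", "bitop", "pfadd", "pfmerge"]
def pvMultiList : List String :=
  ["zinterstore", "zunionstore", "sinterstore", "sunionstore", "sdiffstore", "zmpop", "smove"]

def pvRedisAggKeys : PySem.Set String := PySem.Set.ofList pvAggList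
def pvRedisNullEdgeTokens : PySem.Set String := PySem.Set.ofList pvNullList
def pvRedisMultisetTokens : PySem.Set String := PySem.Set.ofList pvMultiList

def pvTokenizeRedis (cmd : String) : List String :=
  ((PySem.Str.split₀ (PySem.Str.replace cmd "\n" " ")).filter
      (fun t => PySem.Str.strip t != "")).map
    (fun t => PySem.Str.lower (PySem.Str.strip t))

def determine_molt_redis (command : String) : String :=
  let tokens := pvTokenizeRedis command
  if tokens = [] then "dqe"
  else
    let tokenSet := PySem.Set.ofList tokens
    if tokenSet.any (fun t => PySem.Set.contains pvRedisAggKeys t) then "orec"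
    else if tokenSet.any (fun t => PySem.Set.contains pvRedisNullEdgeTokens t) then "tlp"
    else if tokenSet.any (fun t => PySem.Set.contains pvRedisMultisetTokens t) then "pinolo"
    else "dqe"

-- ===== PORT B =====
-- combined index keyword -> (priority, label), built by the same three insertion loops as Source B
def pvPriority : PySem.Dict String (Int × String) :=
  let d := pvAggList.foldl (fun d t => d.insert t (0, "orec")) PySem.Dict.empty
  let d := pvNullList.foldl (fun d t => d.insert t (1, "tlp")) d
  pvMultiList.foldl (fun d t => d.insert t (2, "pinolo")) d

def determine_molt_redis_alt (command : String) : String :=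
  let best := (PySem.Set.ofList (pvTokenizeRedis command)).foldl
    (fun best t =>
      match pvPriority.get? t with
      | none => best
      | some hit =>
        match best with
        | none => some hit
        | some b => if hit.1 < b.1 then some hit else some b)
    none
  match best with
  | some b => b.2
  | none => "dqe"

-- ===== PRECONDITION & SPEC =====
def Spec_determine_molt_redis (command : String) (out : String) : Prop := out = determine_molt_redis_alt command
instance (command : String) (out : String) : Decidable (Spec_determine_molt_redis command out) := by unfold Spec_determine_molt_redis; infer_instance

-- ===== CLAIM (what is proved, stated in full; the proofs are below) =====
def Claim_equal_determine_molt_redis : Prop := ∀ (command : String), Dom_determine_molt_redis command → Spec_determine_molt_redis command (determine_molt_redis command)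

-- ===== LEMMAS AND PROOFS =====

-- B's accumulator update, abstracted: keep the smaller-priority hit (ties/none keep acc)
def pvMerge (acc r : Option (Int × String)) : Option (Int × String) :=
  match r with
  | none => acc
  | some hit =>
    match acc with
    | none => some hit
    | some b => if hit.1 < b.1 then some hit else some b

-- A's decision chain on a token list, as a value
def pvR (ts : List String) : Option (Int × String) :=
  if ts.any (fun t => PySem.Set.contains pvRedisAggKeys t) then some (0, "orec")
  else if ts.any (fun t => PySem.Set.contains pvRedisNullEdgeTokens t) then some (1, "tlp")
  else if ts.any (fun t => PySem.Set.contains pvRedisMultisetTokens t) then some (2, "pinolo")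
  else none

theorem pvAgg_get (t : String) (h : t ∈ pvAggList) : pvPriority.get? t = some (0, "orec") := by
  revert h; revert t; decide

theorem pvNull_get (t : String) (h : t ∈ pvNullList) : pvPriority.get? t = some (1, "tlp") := by
  revert h; revert t; decide

theorem pvMulti_get (t : String) (h : t ∈ pvMultiList) : pvPriority.get? t = some (2, "pinolo") := by
  revert h; revert t; decide

theorem pvKeys : pvPriority.keys = pvAggList ++ pvNullList ++ pvMultiList := by decide

-- the combined dict answers exactly A's three-way classification of a single token
theorem pvPriority_get? (t : String) : pvPriority.get? t = pvR [t] := by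
  by_cases h1 : t ∈ pvAggList
  · rw [pvAgg_get t h1]
    simp [pvR, pvRedisAggKeys, PySem.Set.mem_ofList, h1]
  · by_cases h2 : t ∈ pvNullList
    · rw [pvNull_get t h2]
      simp [pvR, pvRedisAggKeys, pvRedisNullEdgeTokens, PySem.Set.mem_ofList, h1, h2]
    · by_cases h3 : t ∈ pvMultiList
      · rw [pvMulti_get t h3]
        simp [pvR, pvRedisAggKeys, pvRedisNullEdgeTokens, pvRedisMultisetTokens,
          PySem.Set.mem_ofList, h1, h2, h3]
      · have hk : pvPriority.get? t = none := by
          rw [PySem.Dict.get?_eq_none_iff_not_mem_keys, pvKeys]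
          simp [h1, h2, h3]
        rw [hk]
        simp [pvR, pvRedisAggKeys, pvRedisNullEdgeTokens, pvRedisMultisetTokens,
          PySem.Set.mem_ofList, h1, h2, h3]

theorem pvMerge_assoc (a b c : Option (Int × String)) :
    pvMerge (pvMerge a b) c = pvMerge a (pvMerge b c) := by
  cases a with
  | none => cases b <;> cases c <;> (first | (simp only [pvMerge]; split <;> rfl) | simp [pvMerge])
  | some x =>
    cases b with
    | none => cases c <;> simp [pvMerge]
    | some y =>
      cases c with
      | none => simp [pvMerge]
      | some z =>
        by_cases h1 : y.1 < x.1 <;> by_cases h2 : z.1 < y.1 <;> by_cases h3 : z.1 < x.1 <;>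
          simp [pvMerge, h1, h2, h3] <;> omega

-- the if-chain over (p||u, q||v, r||w) is pvMerge of the chains over (p,q,r) and (u,v,w)
theorem pvChainMerge (p q r u v w : Bool) :
    (if (p || u) = true then some ((0 : Int), "orec")
     else if (q || v) = true then some ((1 : Int), "tlp")
     else if (r || w) = true then some ((2 : Int), "pinolo")
     else none)
  = pvMerge
      (if p = true then some ((0 : Int), "orec")
       else if q = true then some ((1 : Int), "tlp")
       else if r = true then some ((2 : Int), "pinolo")
       else none)
      (if u = true then some ((0 : Int), "orec")
       else if v = true then some ((1 : Int), "tlp")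
       else if w = true then some ((2 : Int), "pinolo")
       else none) := by
  revert p q r u v w; decide

theorem pvR_cons (t : String) (ts : List String) :
    pvR (t :: ts) = pvMerge (pvR [t]) (pvR ts) := by
  simp only [pvR, List.any_cons, List.any_nil, Bool.or_false]
  exact pvChainMerge _ _ _ _ _ _

theorem pvFold_eq (ts : List String) : ∀ acc,
    ts.foldl (fun best t =>
      match pvPriority.get? t with
      | none => best
      | some hit =>
        match best with
        | none => some hit
        | some b => if hit.1 < b.1 then some hit else some b) acc
      = pvMerge acc (pvR ts) := by
  induction ts with
  | nil => intro acc; rfl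
  | cons t ts ih =>
    intro acc
    rw [List.foldl_cons, ih, pvR_cons, ← pvMerge_assoc]
    congr 1
    rw [pvPriority_get?]
    rfl

-- ===== VERDICT (by name: the statement is the Claim_ definition above) =====
theorem determine_molt_redis_spec : Claim_equal_determine_molt_redis := by
  intro command _
  unfold Spec_determine_molt_redis determine_molt_redis determine_molt_redis_alt
  rw [pvFold_eq]
  by_cases h : pvTokenizeRedis command = []
  · simp [h, pvMerge, pvR]
  · simp only [h, if_false, pvMerge, pvR]
    split_ifs <;> rfl
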